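-- pv_equiv track=rewrite | github.com/nickth3man/orbital-vsat | src/evaluation/wer.py | _get_edit_operations
-- ===== SOURCE A (Python) =====
-- from typing import List, Dict, Any, Tuple, Optional, Union
--
-- def _get_edit_operations(reference_words: List[str],
--                        hypothesis_words: List[str]) -> List[str]:
--     """Get the edit operations (substitution, deletion, insertion) between word lists.
--
--     Args:
--         reference_words: List of words in the reference text
--         hypothesis_words: List of words in the hypothesis text
--
--     Returns:
--         List[str]: List of operations that transform reference to hypothesis
--     """
--     # Initialize the dynamic programming matrix
--     dp = [[0 for _ in range(len(hypothesis_words) + 1)]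
--          for _ in range(len(reference_words) + 1)]
--     operations = [['' for _ in range(len(hypothesis_words) + 1)]
--                 for _ in range(len(reference_words) + 1)]
--
--     # Fill the first row and column
--     for i in range(len(reference_words) + 1):
--         dp[i][0] = i
--         if i > 0:
--             operations[i][0] = 'deletion'
--
--     for j in range(len(hypothesis_words) + 1):
--         dp[0][j] = j
--         if j > 0:
--             operations[0][j] = 'insertion'
--
--     # Fill the rest of the matrix
--     for i in range(1, len(reference_words) + 1):
--         for j in range(1, len(hypothesis_words) + 1):
--             if reference_words[i-1] == hypothesis_words[j-1]:
--                 dp[i][j] = dp[i-1][j-1]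
--                 operations[i][j] = 'match'
--             else:
--                 # Determine the operation with minimum cost
--                 substitution_cost = dp[i-1][j-1] + 1
--                 deletion_cost = dp[i-1][j] + 1
--                 insertion_cost = dp[i][j-1] + 1
--
--                 min_cost = min(substitution_cost, deletion_cost, insertion_cost)
--                 dp[i][j] = min_cost
--
--                 if min_cost == substitution_cost:
--                     operations[i][j] = 'substitution'
--                 elif min_cost == deletion_cost:
--                     operations[i][j] = 'deletion'
--                 else:
--                     operations[i][j] = 'insertion'
--
--     # Backtrack to get the operations
--     i, j = len(reference_words), len(hypothesis_words)
--     edit_operations = []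
--
--     while i > 0 or j > 0:
--         if i > 0 and j > 0 and operations[i][j] in ['match', 'substitution']:
--             edit_operations.append(operations[i][j])
--             i -= 1
--             j -= 1
--         elif i > 0 and operations[i][j] == 'deletion':
--             edit_operations.append('deletion')
--             i -= 1
--         elif j > 0 and operations[i][j] == 'insertion':
--             edit_operations.append('insertion')
--             j -= 1
--         else:
--             # Shouldn't happen, but just in case
--             break
--
--     # Reverse to get the operations in the right order
--     edit_operations.reverse()
--     return edit_operations
-- ===== SOURCE B (Python) =====
-- def _get_edit_operations(reference_words, hypothesis_words):
--     """Each DP cell carries the edit script itself as a shared persistent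
--     linked trace (op, parent); the answer is read directly off the final
--     cell, so there is no operations matrix and no backtracking pass."""
--     row = [(0, None)]
--     trace = None
--     for j in range(1, len(hypothesis_words) + 1):
--         trace = ('insertion', trace)
--         row.append((j, trace))
--     for i, rw in enumerate(reference_words, 1):
--         diag = row[0]
--         cur0 = (i, ('deletion', diag[1]))
--         new = [cur0]
--         left = cur0
--         for j, hw in enumerate(hypothesis_words, 1):
--             up = row[j]
--             if rw == hw:
--                 cell = (diag[0], ('match', diag[1]))
--             else:
--                 c = 1 + min(diag[0], up[0], left[0])
--                 if c == diag[0] + 1: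
--                     cell = (c, ('substitution', diag[1]))
--                 elif c == up[0] + 1:
--                     cell = (c, ('deletion', up[1]))
--                 else:
--                     cell = (c, ('insertion', left[1]))
--             new.append(cell)
--             diag = up
--             left = cell
--         row = new
--     out = []
--     node = row[-1][1]
--     while node is not None:
--         out.append(node[0])
--         node = node[1]
--     out.reverse()
--     return out
-- ===== Notes on version B (the rewrite author's own statement) =====
-- stated objective: alternative
-- what changed: B stores in every DP cell the edit script itself as a shared persistent linked trace (op, parent), so the operations matrix and the whole backtracking pass of A disappear: the answer is unlinked directly from the final cell.
import Mathlib
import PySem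

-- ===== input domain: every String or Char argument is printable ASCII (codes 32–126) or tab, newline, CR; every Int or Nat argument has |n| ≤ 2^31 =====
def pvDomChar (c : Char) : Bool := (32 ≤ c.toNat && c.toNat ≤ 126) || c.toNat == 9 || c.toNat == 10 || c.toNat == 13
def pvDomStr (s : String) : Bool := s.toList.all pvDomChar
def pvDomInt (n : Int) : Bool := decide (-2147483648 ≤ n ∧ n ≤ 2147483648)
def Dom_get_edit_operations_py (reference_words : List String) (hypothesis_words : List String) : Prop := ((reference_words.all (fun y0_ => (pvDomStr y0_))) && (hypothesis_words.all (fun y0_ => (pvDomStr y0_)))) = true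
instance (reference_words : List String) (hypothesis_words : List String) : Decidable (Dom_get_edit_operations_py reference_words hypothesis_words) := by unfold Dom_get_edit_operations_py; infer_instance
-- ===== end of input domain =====

-- B stores the edit script itself in every DP cell as a shared persistent linked trace, so A's
-- operations matrix and backtracking pass disappear (objective: alternative, same asymptotic cost).

-- ===== PORT A =====
-- A's matrices are represented as update functions Nat → Nat → _ (a Python list-of-lists
-- assignment dp[i][j] = v becomes the pointwise update below); indices are read with getD,
-- exact here because every read in A is in range.
def updI (f : Nat → Nat → Int) (i j : Nat) (v : Int) : Nat → Nat → Int :=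
  fun i' j' => if i' = i ∧ j' = j then v else f i' j'

def updS (f : Nat → Nat → String) (i j : Nat) (v : String) : Nat → Nat → String :=
  fun i' j' => if i' = i ∧ j' = j then v else f i' j'

-- body of A's "first column" loop
def colStepA (st : (Nat → Nat → Int) × (Nat → Nat → String)) (i : Nat) :
    (Nat → Nat → Int) × (Nat → Nat → String) :=
  (updI st.1 i 0 (i : Int), if i > 0 then updS st.2 i 0 "deletion" else st.2)

-- body of A's "first row" loop
def rowStepA (st : (Nat → Nat → Int) × (Nat → Nat → String)) (j : Nat) :
    (Nat → Nat → Int) × (Nat → Nat → String) :=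
  (updI st.1 0 j (j : Int), if j > 0 then updS st.2 0 j "insertion" else st.2)

-- body of A's nested fill loop at cell (i, j), 1 ≤ i, 1 ≤ j
def stepA (r h : List String) (st : (Nat → Nat → Int) × (Nat → Nat → String)) (i j : Nat) :
    (Nat → Nat → Int) × (Nat → Nat → String) :=
  let dp := st.1
  let ops := st.2
  if r.getD (i-1) "" = h.getD (j-1) "" then
    (updI dp i j (dp (i-1) (j-1)), updS ops i j "match")
  else
    let sc := dp (i-1) (j-1) + 1
    let dc := dp (i-1) j + 1
    let ic := dp i (j-1) + 1
    let mc := min sc (min dc ic)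
    (updI dp i j mc,
     updS ops i j (if mc = sc then "substitution" else if mc = dc then "deletion" else "insertion"))

-- A's backtracking while-loop (appends, reversed by the caller)
def backA (ops : Nat → Nat → String) (i j : Nat) (acc : List String) : List String :=
  if i > 0 ∨ j > 0 then
    if h1 : i > 0 ∧ j > 0 ∧ (ops i j = "match" ∨ ops i j = "substitution") then
      backA ops (i-1) (j-1) (acc ++ [ops i j])
    else if h2 : i > 0 ∧ ops i j = "deletion" then
      backA ops (i-1) j (acc ++ ["deletion"])
    else if h3 : j > 0 ∧ ops i j = "insertion" then
      backA ops i (j-1) (acc ++ ["insertion"])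
    else acc
  else acc
termination_by i + j
decreasing_by
  · obtain ⟨a, b, -⟩ := h1; omega
  · obtain ⟨a, -⟩ := h2; omega
  · obtain ⟨a, -⟩ := h3; omega

def get_edit_operations_py (reference_words : List String) (hypothesis_words : List String) : List String :=
  let n := reference_words.length
  let m := hypothesis_words.length
  let st0 : (Nat → Nat → Int) × (Nat → Nat → String) := (fun _ _ => 0, fun _ _ => "")
  let st1 := (List.range (n+1)).foldl colStepA st0
  let st2 := (List.range (m+1)).foldl rowStepA st1
  let st3 := (List.range n).foldl
    (fun st i0 => (List.range m).foldl
      (fun st' j0 => stepA reference_words hypothesis_words st' (i0+1) (j0+1)) st) st2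
  (backA st3.2 n m []).reverse

-- ===== PORT B =====
-- B's linked trace node ('op', parent) is a Lean list cell op :: parent; Python's None is [].
-- A cell (cost, trace) is Int × List String.

-- body of B's first loop (row 0): for j in range(1, m+1): trace = ('insertion', trace); append (j, trace)
def initRowStepB (st : List (Int × List String) × List String) (j0 : Nat) :
    List (Int × List String) × List String :=
  let trace := "insertion" :: st.2
  (st.1 ++ [(((j0 : Int) + 1), trace)], trace)

def initRowB (m : Nat) : List (Int × List String) :=
  ((List.range m).foldl initRowStepB ([((0 : Int), [])], [])).1

-- body of B's inner loop; state (new, diag, left, j); consumes the next hypothesis word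
def stepB (row : List (Int × List String)) (rw : String)
    (st : List (Int × List String) × (Int × List String) × (Int × List String) × Nat)
    (hw : String) :
    List (Int × List String) × (Int × List String) × (Int × List String) × Nat :=
  let new := st.1
  let diag := st.2.1
  let left := st.2.2.1
  let j := st.2.2.2
  let up := row.getD j ((0 : Int), [])
  let cell :=
    if rw = hw then (diag.1, "match" :: diag.2)
    else
      let c := 1 + min diag.1 (min up.1 left.1)
      if c = diag.1 + 1 then (c, "substitution" :: diag.2)
      else if c = up.1 + 1 then (c, "deletion" :: up.2)
      else (c, "insertion" :: left.2)
  (new ++ [cell], up, cell, j + 1)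

-- body of B's outer loop; state (row, i0) where the Python 1-based i is i0+1
def rowStepB (h : List String) (st : List (Int × List String) × Nat) (rw : String) :
    List (Int × List String) × Nat :=
  let row := st.1
  let i := st.2 + 1
  let diag := row.getD 0 ((0 : Int), [])
  let cur0 : Int × List String := ((i : Int), "deletion" :: diag.2)
  ((h.foldl (stepB row rw) ([cur0], diag, cur0, 1)).1, i)

-- B's final while-loop unlinking the trace of the last cell
def unwindB : List String → List String → List String
  | [], acc => acc
  | op :: rest, acc => unwindB rest (acc ++ [op])

def get_edit_operations_py_alt (reference_words : List String) (hypothesis_words : List String) : List String :=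
  let row0 := initRowB hypothesis_words.length
  let finalRow := (reference_words.foldl (rowStepB hypothesis_words) (row0, 0)).1
  (unwindB ((PySem.List.pyGet? finalRow (-1)).getD ((0 : Int), [])).2 []).reverse

-- ===== PRECONDITION & SPEC =====
def Spec_get_edit_operations_py (reference_words : List String) (hypothesis_words : List String) (out : List String) : Prop := out = get_edit_operations_py_alt reference_words hypothesis_words
instance (reference_words : List String) (hypothesis_words : List String) (out : List String) : Decidable (Spec_get_edit_operations_py reference_words hypothesis_words out) := by unfold Spec_get_edit_operations_py; infer_instance

-- ===== CLAIM (what is proved, stated in full; the proofs are below) =====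
def Claim_equal_get_edit_operations_py : Prop := ∀ (reference_words : List String) (hypothesis_words : List String), Dom_get_edit_operations_py reference_words hypothesis_words → Spec_get_edit_operations_py reference_words hypothesis_words (get_edit_operations_py reference_words hypothesis_words)

-- ===== LEMMAS AND PROOFS =====

-- the Levenshtein cost table, as a recurrence
def lev (r h : List String) : Nat → Nat → Nat
  | 0, j => j
  | i+1, 0 => i+1
  | i+1, j+1 =>
    if r.getD i "" = h.getD j "" then lev r h i j
    else 1 + min (lev r h i j) (min (lev r h i (j+1)) (lev r h (i+1) j))
termination_by i j => (i, j)

-- the operation A's fill phase stores at interior cell (i, j), expressed from lev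
def opAt (r h : List String) (i j : Nat) : String :=
  if r.getD (i-1) "" = h.getD (j-1) "" then "match"
  else if lev r h i j = lev r h (i-1) (j-1) + 1 then "substitution"
  else if lev r h i j = lev r h (i-1) j + 1 then "deletion"
  else "insertion"

-- the (reversed) operation trace: what A's backtrack collects, and what B's cell traces store
def btR (r h : List String) (i j : Nat) : List String :=
  if i = 0 then List.replicate j "insertion"
  else if j = 0 then List.replicate i "deletion"
  else if r.getD (i-1) "" = h.getD (j-1) "" then "match" :: btR r h (i-1) (j-1)
  else if lev r h i j = lev r h (i-1) (j-1) + 1 then "substitution" :: btR r h (i-1) (j-1)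
  else if lev r h i j = lev r h (i-1) j + 1 then "deletion" :: btR r h (i-1) j
  else "insertion" :: btR r h i (j-1)
termination_by i + j
decreasing_by all_goals omega

theorem lev_zero_left (r h : List String) (j : Nat) : lev r h 0 j = j := by
  cases j <;> simp [lev]

theorem lev_zero_right (r h : List String) (i : Nat) : lev r h i 0 = i := by
  cases i <;> simp [lev]

theorem btR_zero_left (r h : List String) (j : Nat) : btR r h 0 j = List.replicate j "insertion" := by
  rw [btR]; simp

theorem btR_zero_right (r h : List String) (i : Nat) : btR r h i 0 = List.replicate i "deletion" := by
  rw [btR]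
  rcases i with _ | i <;> simp

-- generic foldl-over-range invariant
theorem foldl_range_inv {α : Type} (f : α → Nat → α) (P : Nat → α → Prop) (n : Nat) (st : α)
    (h0 : P 0 st) (hstep : ∀ k s, k < n → P k s → P (k+1) (f s k)) :
    P n ((List.range n).foldl f st) := by
  induction n with
  | zero => simpa using h0
  | succ t ih =>
    rw [List.range_succ, List.foldl_append]
    exact hstep t _ (Nat.lt_succ_self t) (ih (fun k s hk hp => hstep k s (Nat.lt_succ_of_lt hk) hp))

-- generic foldl-over-list invariant, indexed by position
theorem foldl_list_inv {α β : Type} (f : β → α → β) (l : List α) (P : Nat → β → Prop) (st : β)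
    (h0 : P 0 st)
    (hstep : ∀ k s (hk : k < l.length), P k s → P (k+1) (f s l[k])) :
    P l.length (l.foldl f st) := by
  induction l generalizing P st with
  | nil => simpa using h0
  | cons a t ih =>
    simp only [List.foldl_cons, List.length_cons]
    exact ih (fun k s => P (k+1) s) (f st a)
      (hstep 0 st (Nat.succ_pos _) h0)
      (fun k s hk hp => hstep (k+1) s (by simpa using Nat.succ_lt_succ hk) hp)

theorem mapRange_getD {α : Type} [Inhabited α] (f : Nat → α) (t k : Nat) (d : α) (hk : k < t) :
    ((List.range t).map f).getD k d = f k := by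
  rw [List.getD_eq_getElem?_getD, List.getElem?_map, List.getElem?_range hk]
  rfl

-- pointwise characterizations of A's loop bodies
theorem colStepA_fst (st : (Nat → Nat → Int) × (Nat → Nat → String)) (i i' j' : Nat) :
    (colStepA st i).1 i' j' = if i' = i ∧ j' = 0 then (i : Int) else st.1 i' j' := by
  simp only [colStepA, updI]

theorem colStepA_snd (st : (Nat → Nat → Int) × (Nat → Nat → String)) (i i' j' : Nat) :
    (colStepA st i).2 i' j' = if i' = i ∧ j' = 0 ∧ 0 < i then "deletion" else st.2 i' j' := by
  simp only [colStepA]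
  by_cases h0 : i > 0
  · rw [if_pos h0]
    simp only [updS]
    split_ifs <;> first | rfl | omega
  · rw [if_neg h0]
    split_ifs <;> first | rfl | omega

theorem rowStepA_fst (st : (Nat → Nat → Int) × (Nat → Nat → String)) (j i' j' : Nat) :
    (rowStepA st j).1 i' j' = if i' = 0 ∧ j' = j then (j : Int) else st.1 i' j' := by
  simp only [rowStepA, updI]

theorem rowStepA_snd (st : (Nat → Nat → Int) × (Nat → Nat → String)) (j i' j' : Nat) :
    (rowStepA st j).2 i' j' = if i' = 0 ∧ j' = j ∧ 0 < j then "insertion" else st.2 i' j' := by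
  simp only [rowStepA]
  by_cases h0 : j > 0
  · rw [if_pos h0]
    simp only [updS]
    split_ifs <;> first | rfl | omega
  · rw [if_neg h0]
    split_ifs <;> first | rfl | omega

theorem stepA_fst (r h : List String) (st : (Nat → Nat → Int) × (Nat → Nat → String)) (i j i' j' : Nat) :
    (stepA r h st i j).1 i' j' =
      if i' = i ∧ j' = j then
        (if r.getD (i-1) "" = h.getD (j-1) "" then st.1 (i-1) (j-1)
         else min (st.1 (i-1) (j-1) + 1) (min (st.1 (i-1) j + 1) (st.1 i (j-1) + 1)))
      else st.1 i' j' := by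
  unfold stepA
  by_cases e : r.getD (i-1) "" = h.getD (j-1) ""
  · simp only [if_pos e]
    rfl
  · simp only [if_neg e]
    rfl

theorem stepA_snd (r h : List String) (st : (Nat → Nat → Int) × (Nat → Nat → String)) (i j i' j' : Nat) :
    (stepA r h st i j).2 i' j' =
      if i' = i ∧ j' = j then
        (if r.getD (i-1) "" = h.getD (j-1) "" then "match"
         else if min (st.1 (i-1) (j-1) + 1) (min (st.1 (i-1) j + 1) (st.1 i (j-1) + 1)) = st.1 (i-1) (j-1) + 1 then "substitution"
         else if min (st.1 (i-1) (j-1) + 1) (min (st.1 (i-1) j + 1) (st.1 i (j-1) + 1)) = st.1 (i-1) j + 1 then "deletion"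
         else "insertion")
      else st.2 i' j' := by
  unfold stepA
  by_cases e : r.getD (i-1) "" = h.getD (j-1) ""
  · simp only [if_pos e]
    rfl
  · simp only [if_neg e]
    rfl

-- A-side fill invariant: rows ≤ k are complete and row k+1 is filled up to column t
def InvA (r h : List String) (k t : Nat) (st : (Nat → Nat → Int) × (Nat → Nat → String)) : Prop :=
  (∀ i, i ≤ r.length → st.1 i 0 = (i : Int)) ∧
  (∀ j, j ≤ h.length → st.1 0 j = (j : Int)) ∧
  (∀ i, 1 ≤ i → i ≤ r.length → st.2 i 0 = "deletion") ∧
  (∀ j, 1 ≤ j → j ≤ h.length → st.2 0 j = "insertion") ∧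
  (∀ i j, 1 ≤ i → i ≤ r.length → 1 ≤ j → j ≤ h.length → (i ≤ k ∨ (i = k + 1 ∧ j ≤ t)) →
    st.1 i j = (lev r h i j : Int) ∧ st.2 i j = opAt r h i j)

theorem stepA_inv (r h : List String) (k t : Nat) (st : (Nat → Nat → Int) × (Nat → Nat → String))
    (hk : k < r.length) (ht : t < h.length) (hst : InvA r h k t st) :
    InvA r h k (t+1) (stepA r h st (k+1) (t+1)) := by
  obtain ⟨c0, r0, cd, ri, inner⟩ := hst
  have hdpkt : st.1 k t = (lev r h k t : Int) := by
    rcases Nat.eq_zero_or_pos k with hk0 | hk0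
    · subst hk0; rw [r0 t (le_of_lt ht), lev_zero_left]
    · rcases Nat.eq_zero_or_pos t with ht0 | ht0
      · subst ht0; rw [c0 k (le_of_lt hk), lev_zero_right]
      · exact (inner k t hk0 (le_of_lt hk) ht0 (le_of_lt ht) (Or.inl le_rfl)).1
  have hdpkt1 : st.1 k (t+1) = (lev r h k (t+1) : Int) := by
    rcases Nat.eq_zero_or_pos k with hk0 | hk0
    · subst hk0; rw [r0 (t+1) ht, lev_zero_left]
    · exact (inner k (t+1) hk0 (le_of_lt hk) (Nat.succ_pos t) ht (Or.inl le_rfl)).1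
  have hdpk1t : st.1 (k+1) t = (lev r h (k+1) t : Int) := by
    rcases Nat.eq_zero_or_pos t with ht0 | ht0
    · subst ht0; rw [c0 (k+1) hk, lev_zero_right]
    · exact (inner (k+1) t (Nat.succ_pos k) hk ht0 (le_of_lt ht) (Or.inr ⟨rfl, le_rfl⟩)).1
  have hlev : (lev r h (k+1) (t+1) : Int) =
      if r.getD k "" = h.getD t "" then st.1 k t
      else min (st.1 k t + 1) (min (st.1 k (t+1) + 1) (st.1 (k+1) t + 1)) := by
    rw [hdpkt, hdpkt1, hdpk1t, lev]
    split
    · rfl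
    · push_cast
      omega
  refine ⟨?_, ?_, ?_, ?_, ?_⟩
  · intro i hi
    rw [stepA_fst, if_neg (by omega)]
    exact c0 i hi
  · intro j hj
    rw [stepA_fst, if_neg (by omega)]
    exact r0 j hj
  · intro i h1 h2
    rw [stepA_snd, if_neg (by omega)]
    exact cd i h1 h2
  · intro j h1 h2
    rw [stepA_snd, if_neg (by omega)]
    exact ri j h1 h2
  · intro i j h1 h2 h3 h4 hreg
    by_cases hcell : i = k + 1 ∧ j = t + 1
    · obtain ⟨hi, hj⟩ := hcell; subst hi; subst hj
      simp only [Nat.add_sub_cancel] at *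
      constructor
      · rw [stepA_fst, if_pos ⟨rfl, rfl⟩]
        simp only [Nat.add_sub_cancel]
        rw [hlev]
      · rw [stepA_snd, if_pos ⟨rfl, rfl⟩]
        simp only [Nat.add_sub_cancel]
        unfold opAt
        simp only [Nat.add_sub_cancel]
        by_cases e : r.getD k "" = h.getD t ""
        · rw [if_pos e, if_pos e]
        · rw [if_neg e, if_neg e]
          rw [if_neg e] at hlev
          have c1 : (min (st.1 k t + 1) (min (st.1 k (t+1) + 1) (st.1 (k+1) t + 1)) = st.1 k t + 1)
              ↔ (lev r h (k+1) (t+1) = lev r h k t + 1) := by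
            rw [hdpkt, hdpkt1, hdpk1t] at hlev ⊢
            omega
          have c2 : (min (st.1 k t + 1) (min (st.1 k (t+1) + 1) (st.1 (k+1) t + 1)) = st.1 k (t+1) + 1)
              ↔ (lev r h (k+1) (t+1) = lev r h k (t+1) + 1) := by
            rw [hdpkt, hdpkt1, hdpk1t] at hlev ⊢
            omega
          rw [if_congr c1 rfl (if_congr c2 rfl rfl)]
    · have hold : i ≤ k ∨ (i = k + 1 ∧ j ≤ t) := by omega
      constructor
      · rw [stepA_fst, if_neg hcell]
        exact (inner i j h1 h2 h3 h4 hold).1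
      · rw [stepA_snd, if_neg hcell]
        exact (inner i j h1 h2 h3 h4 hold).2

-- the state after A's two border loops
theorem bordersA_inv (r h : List String) :
    InvA r h 0 0
      ((List.range (h.length+1)).foldl rowStepA
        ((List.range (r.length+1)).foldl colStepA (fun _ _ => (0 : Int), fun _ _ => ""))) := by
  have hcol := foldl_range_inv colStepA
    (fun k st =>
      (∀ i' j', st.1 i' j' = if j' = 0 ∧ i' < k then (i' : Int) else 0) ∧
      (∀ i' j', st.2 i' j' = if j' = 0 ∧ 1 ≤ i' ∧ i' < k then "deletion" else ""))
    (r.length+1) (fun _ _ => (0 : Int), fun _ _ => "")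
    (by constructor <;> (intro i' j'; simp))
    (by
      intro k s hk hp
      obtain ⟨p1, p2⟩ := hp
      constructor
      · intro i' j'
        rw [colStepA_fst, p1]
        split_ifs <;> first | rfl | omega
      · intro i' j'
        rw [colStepA_snd, p2]
        split_ifs <;> first | rfl | omega)
  obtain ⟨p1, p2⟩ := hcol
  have hrow := foldl_range_inv rowStepA
    (fun k st =>
      (∀ i' j', st.1 i' j' = if j' = 0 ∧ i' ≤ r.length then (i' : Int)
          else if i' = 0 ∧ j' < k then (j' : Int) else 0) ∧
      (∀ i' j', st.2 i' j' = if j' = 0 ∧ 1 ≤ i' ∧ i' ≤ r.length then "deletion"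
          else if i' = 0 ∧ 1 ≤ j' ∧ j' < k then "insertion" else ""))
    (h.length+1) _
    (by
      constructor
      · intro i' j'
        rw [p1]
        split_ifs <;> first | rfl | omega
      · intro i' j'
        rw [p2]
        split_ifs <;> first | rfl | omega)
    (by
      intro k s hk hp
      obtain ⟨q1, q2⟩ := hp
      constructor
      · intro i' j'
        rw [rowStepA_fst, q1]
        split_ifs <;> first | rfl | omega | (exfalso; omega) | (simp_all; omega)
      · intro i' j'
        rw [rowStepA_snd, q2]
        split_ifs <;> first | rfl | omega)
  obtain ⟨q1, q2⟩ := hrow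
  refine ⟨?_, ?_, ?_, ?_, ?_⟩
  · intro i hi
    rw [q1]
    split_ifs <;> first | rfl | omega
  · intro j hj
    rw [q1]
    split_ifs <;> first | rfl | omega
  · intro i h1 h2
    rw [q2]
    split_ifs <;> first | rfl | omega
  · intro j h1 h2
    rw [q2]
    split_ifs <;> first | rfl | omega
  · intro i j h1 h2 h3 h4 hreg
    omega

-- the state after A's whole fill phase
theorem fillA_inv (r h : List String) :
    InvA r h r.length h.length
      ((List.range r.length).foldl
        (fun st i0 => (List.range h.length).foldl
          (fun st' j0 => stepA r h st' (i0+1) (j0+1)) st)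
        ((List.range (h.length+1)).foldl rowStepA
          ((List.range (r.length+1)).foldl colStepA (fun _ _ => (0 : Int), fun _ _ => "")))) := by
  have main := foldl_range_inv
    (fun st i0 => (List.range h.length).foldl (fun st' j0 => stepA r h st' (i0+1) (j0+1)) st)
    (fun k st => k ≤ r.length ∧ InvA r h k 0 st)
    r.length _
    (⟨Nat.zero_le _, bordersA_inv r h⟩)
    (by
      intro k s hk hp
      obtain ⟨hkle, hinv⟩ := hp
      refine ⟨hk, ?_⟩
      have hin := foldl_range_inv (fun st' j0 => stepA r h st' (k+1) (j0+1))
        (fun t st' => t ≤ h.length ∧ InvA r h k t st')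
        h.length s ⟨Nat.zero_le _, hinv⟩
        (fun t s' ht hp' => ⟨ht, stepA_inv r h k t s' hk ht hp'.2⟩)
      obtain ⟨-, c0, r0, cd, ri, inner⟩ := hin
      exact ⟨c0, r0, cd, ri, fun i j h1 h2 h3 h4 hreg =>
        inner i j h1 h2 h3 h4 (by omega)⟩)
  obtain ⟨-, c0, r0, cd, ri, inner⟩ := main
  exact ⟨c0, r0, cd, ri, fun i j h1 h2 h3 h4 hreg => inner i j h1 h2 h3 h4 (by omega)⟩

-- backtrack A follows btR
theorem backA_spec (r h : List String) (ops : Nat → Nat → String)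
    (hdel : ∀ i, 1 ≤ i → i ≤ r.length → ops i 0 = "deletion")
    (hins : ∀ j, 1 ≤ j → j ≤ h.length → ops 0 j = "insertion")
    (hop : ∀ i j, 1 ≤ i → i ≤ r.length → 1 ≤ j → j ≤ h.length → ops i j = opAt r h i j) :
    ∀ N i j acc, i + j ≤ N → i ≤ r.length → j ≤ h.length →
      backA ops i j acc = acc ++ btR r h i j := by
  intro N
  induction N with
  | zero =>
    intro i j acc hN hi hj
    have : i = 0 ∧ j = 0 := by omega
    obtain ⟨a, b⟩ := this; subst a; subst b
    rw [backA, btR]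
    simp
  | succ N ih =>
    intro i j acc hN hi hj
    match i, j with
    | 0, 0 =>
      rw [backA, btR]
      simp
    | 0, j+1 =>
      rw [backA]
      have ho := hins (j+1) (Nat.succ_pos j) hj
      rw [if_pos (by omega), dif_neg (by omega), dif_neg (by omega),
        dif_pos ⟨Nat.succ_pos j, ho⟩]
      simp only [Nat.add_sub_cancel]
      rw [ih 0 j _ (by omega) hi (by omega), btR_zero_left, btR_zero_left,
        List.replicate_succ]
      simp
    | i+1, 0 =>
      rw [backA]
      have ho := hdel (i+1) (Nat.succ_pos i) hi
      rw [if_pos (by omega), dif_neg (by omega), dif_pos ⟨Nat.succ_pos i, ho⟩]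
      simp only [Nat.add_sub_cancel]
      rw [ih i 0 _ (by omega) (by omega) hj, btR_zero_right, btR_zero_right,
        List.replicate_succ]
      simp
    | i+1, j+1 =>
      have ho := hop (i+1) (j+1) (Nat.succ_pos i) hi (Nat.succ_pos j) hj
      rw [backA, if_pos (by omega)]
      rw [btR]
      rw [if_neg (Nat.succ_ne_zero i), if_neg (Nat.succ_ne_zero j)]
      simp only [Nat.add_sub_cancel] at ho ⊢
      unfold opAt at ho
      simp only [Nat.add_sub_cancel] at ho
      by_cases e : r.getD i "" = h.getD j ""
      · rw [if_pos e] at ho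
        rw [dif_pos ⟨Nat.succ_pos i, Nat.succ_pos j, Or.inl ho⟩, ho]
        rw [ih i j _ (by omega) (by omega) (by omega), if_pos e]
        simp
      · rw [if_neg e] at ho
        rw [if_neg e]
        by_cases c1 : lev r h (i+1) (j+1) = lev r h i j + 1
        · rw [if_pos c1] at ho
          rw [dif_pos ⟨Nat.succ_pos i, Nat.succ_pos j, Or.inr ho⟩, ho]
          rw [ih i j _ (by omega) (by omega) (by omega), if_pos c1]
          simp
        · rw [if_neg c1] at ho
          rw [if_neg c1]
          by_cases c2 : lev r h (i+1) (j+1) = lev r h i (j+1) + 1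
          · rw [if_pos c2] at ho
            rw [dif_neg (by simp [ho]), dif_pos ⟨Nat.succ_pos i, ho⟩]
            rw [ih i (j+1) _ (by omega) (by omega) hj, if_pos c2]
            simp
          · rw [if_neg c2] at ho
            rw [if_neg c2]
            rw [dif_neg (by simp [ho]), dif_neg (by simp [ho]),
              dif_pos ⟨Nat.succ_pos j, ho⟩]
            rw [ih (i+1) j _ (by omega) hi (by omega)]
            simp

-- B-side: the row of cells (cost, trace) at row index i
def cellT (r h : List String) (i j : Nat) : Int × List String :=
  ((lev r h i j : Int), btR r h i j)

def tRow (r h : List String) (i : Nat) : List (Int × List String) :=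
  (List.range (h.length+1)).map (fun j => cellT r h i j)

theorem initRowB_spec (r h : List String) : initRowB h.length = tRow r h 0 := by
  have main := foldl_range_inv initRowStepB
    (fun k st =>
      st.1 = (List.range (k+1)).map (fun j => (((j : Nat) : Int), List.replicate j "insertion")) ∧
      st.2 = List.replicate k "insertion")
    h.length ([((0 : Int), [])], [])
    (by
      constructor
      · rw [List.range_one]; simp
      · rfl)
    (by
      intro k s hk hp
      obtain ⟨p1, p2⟩ := hp
      unfold initRowStepB
      constructor
      · dsimp only
        rw [p1, p2]
        rw [List.range_succ (n := k+1), List.map_append]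
        simp [List.replicate_succ]
      · dsimp only
        rw [p2, List.replicate_succ])
  obtain ⟨p1, -⟩ := main
  unfold initRowB tRow
  rw [p1]
  apply List.map_congr_left
  intro a ha
  unfold cellT
  rw [lev_zero_left, btR_zero_left]

theorem tRow_getD (r h : List String) (i j : Nat) (hj : j ≤ h.length) :
    (tRow r h i).getD j ((0 : Int), []) = cellT r h i j := by
  unfold tRow
  exact mapRange_getD _ _ _ _ (by omega)

-- B's inner fold produces the next tRow
theorem innerB_spec (r h : List String) (k : Nat) (hk : k < r.length) :
    (h.foldl (stepB (tRow r h k) (r.getD k ""))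
      ([cellT r h (k+1) 0], cellT r h k 0, cellT r h (k+1) 0, 1)).1 = tRow r h (k+1) := by
  have main := foldl_list_inv (stepB (tRow r h k) (r.getD k "")) h
    (fun t st =>
      st.1 = (List.range (t+1)).map (fun j => cellT r h (k+1) j) ∧
      st.2.1 = cellT r h k t ∧ st.2.2.1 = cellT r h (k+1) t ∧ st.2.2.2 = t + 1)
    ([cellT r h (k+1) 0], cellT r h k 0, cellT r h (k+1) 0, 1)
    (by
      refine ⟨?_, rfl, rfl, rfl⟩
      rw [List.range_one]; simp)
    (by
      intro t s ht hp
      obtain ⟨p1, p2, p3, p4⟩ := hp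
      have hht : h[t] = h.getD t "" := (List.getD_eq_getElem h "" ht).symm
      unfold stepB
      dsimp only
      rw [p2, p3, p4, hht]
      rw [tRow_getD r h k (t+1) ht]
      have hcell :
          (if r.getD k "" = h.getD t "" then ((cellT r h k t).1, "match" :: (cellT r h k t).2)
           else
             let c := 1 + min (cellT r h k t).1 (min (cellT r h k (t+1)).1 (cellT r h (k+1) t).1)
             if c = (cellT r h k t).1 + 1 then (c, "substitution" :: (cellT r h k t).2)
             else if c = (cellT r h k (t+1)).1 + 1 then (c, "deletion" :: (cellT r h k (t+1)).2)
             else (c, "insertion" :: (cellT r h (k+1) t).2))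
          = cellT r h (k+1) (t+1) := by
        unfold cellT
        dsimp only
        have hlev : lev r h (k+1) (t+1) =
            if r.getD k "" = h.getD t "" then lev r h k t
            else 1 + min (lev r h k t) (min (lev r h k (t+1)) (lev r h (k+1) t)) := by
          rw [lev]
        have hbt : btR r h (k+1) (t+1) =
            if r.getD k "" = h.getD t "" then "match" :: btR r h k t
            else if lev r h (k+1) (t+1) = lev r h k t + 1 then "substitution" :: btR r h k t
            else if lev r h (k+1) (t+1) = lev r h k (t+1) + 1 then "deletion" :: btR r h k (t+1)
            else "insertion" :: btR r h (k+1) t := by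
          rw [btR]
          rw [if_neg (Nat.succ_ne_zero k), if_neg (Nat.succ_ne_zero t)]
          simp only [Nat.add_sub_cancel]
        by_cases e : r.getD k "" = h.getD t ""
        · rw [if_pos e, hbt, if_pos e, hlev, if_pos e]
        · rw [if_neg e]
          rw [if_neg e] at hlev
          rw [if_neg e] at hbt
          have hc : 1 + min ((lev r h k t : Int)) (min ((lev r h k (t+1) : Int)) ((lev r h (k+1) t : Int)))
              = (lev r h (k+1) (t+1) : Int) := by
            rw [hlev]; push_cast; omega
          have q1 : (1 + min ((lev r h k t : Int)) (min ((lev r h k (t+1) : Int)) ((lev r h (k+1) t : Int)))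
              = (lev r h k t : Int) + 1) ↔ lev r h (k+1) (t+1) = lev r h k t + 1 := by
            rw [hc]; omega
          have q2 : (1 + min ((lev r h k t : Int)) (min ((lev r h k (t+1) : Int)) ((lev r h (k+1) t : Int)))
              = (lev r h k (t+1) : Int) + 1) ↔ lev r h (k+1) (t+1) = lev r h k (t+1) + 1 := by
            rw [hc]; omega
          rw [hbt]
          by_cases c1 : lev r h (k+1) (t+1) = lev r h k t + 1
          · rw [if_pos (q1.mpr c1), if_pos c1, hc]
          · rw [if_neg (fun hh => c1 (q1.mp hh)), if_neg c1]
            by_cases c2 : lev r h (k+1) (t+1) = lev r h k (t+1) + 1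
            · rw [if_pos (q2.mpr c2), if_pos c2, hc]
            · rw [if_neg (fun hh => c2 (q2.mp hh)), if_neg c2, hc]
      rw [hcell]
      refine ⟨?_, rfl, rfl, rfl⟩
      rw [p1, List.range_succ (n := t+1), List.map_append]
      simp)
  obtain ⟨p1, -⟩ := main
  rw [p1]
  rfl

-- B's outer fold keeps row = tRow
theorem outerB_spec (r h : List String) :
    (r.foldl (rowStepB h) (initRowB h.length, 0)).1 = tRow r h r.length := by
  have main := foldl_list_inv (rowStepB h) r
    (fun k st => st.1 = tRow r h k ∧ st.2 = k)
    (initRowB h.length, 0)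
    ⟨initRowB_spec r h, rfl⟩
    (by
      intro k s hk hp
      obtain ⟨p1, p2⟩ := hp
      have hrk : r[k] = r.getD k "" := (List.getD_eq_getElem r "" hk).symm
      unfold rowStepB
      dsimp only
      rw [p1, p2, hrk]
      rw [tRow_getD r h k 0 (Nat.zero_le _)]
      have hcur0 : (((k + 1 : Nat) : Int), "deletion" :: (cellT r h k 0).2) = cellT r h (k+1) 0 := by
        unfold cellT
        rw [lev_zero_right, lev_zero_right, btR_zero_right, btR_zero_right,
          List.replicate_succ]
      refine ⟨?_, rfl⟩
      rw [hcur0]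
      exact innerB_spec r h k hk)
  exact main.1

theorem unwindB_spec (c acc : List String) : unwindB c acc = acc ++ c := by
  induction c generalizing acc with
  | nil => simp [unwindB]
  | cons a t ih => rw [unwindB, ih]; simp

theorem tRow_last (r h : List String) (i : Nat) :
    PySem.List.pyGet? (tRow r h i) (-1) = some (cellT r h i h.length) := by
  rw [PySem.List.pyGet?_neg_one]
  unfold tRow
  rw [List.getLast?_eq_getElem?]
  simp

-- ===== VERDICT (by name: the statement is the Claim_ definition above) =====
theorem get_edit_operations_py_spec : Claim_equal_get_edit_operations_py := by
  intro r h _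
  unfold Spec_get_edit_operations_py get_edit_operations_py get_edit_operations_py_alt
  dsimp only
  have hA := fillA_inv r h
  obtain ⟨-, -, cd, ri, inner⟩ := hA
  rw [backA_spec r h _ cd ri
      (fun i j h1 h2 h3 h4 => (inner i j h1 h2 h3 h4 (Or.inl h2)).2)
      (r.length + h.length) r.length h.length [] le_rfl le_rfl le_rfl,
    outerB_spec r h, tRow_last r h, Option.getD_some, unwindB_spec]
  rfl
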